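-- pv_equiv track=rewrite | github.com/huiyanglu/LearnCodewars | slogan_maker.py | slogan_maker
-- ===== SOURCE A (Python) =====
-- import itertools
--
-- def slogan_maker(a):
--     a2 = list(set(a))
--     a2.sort(key=a.index) # 字符串去重后按原顺序排列
--     x = []
--     result = list(itertools.permutations(a2, len(a2))) # 字符串排列组合考虑顺序
--     for i in range(0,len(result)):
--         x.append(join1(result[i]))
--         i+=1
--     return x
--
-- def join1(x): # 字符串合并join
--     x1 = list(x)
--     return ' '.join(x1)
-- ===== SOURCE B (Python) =====
-- def slogan_maker(a):
--     # order-preserving dedup via dict.fromkeys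
--     words = list(dict.fromkeys(a))
--     n = len(words)
--     fact = 1
--     for i in range(2, n + 1):
--         fact *= i
--     # factorial-number-system unranking: decode each rank k directly into
--     # its permutation instead of enumerating permutations recursively
--     out = []
--     for k in range(fact):
--         rest = list(words)
--         parts = []
--         f = fact
--         while rest:
--             f //= len(rest)
--             parts.append(rest.pop(k // f))
--             k %= f
--         out.append(' '.join(parts))
--     return out
-- ===== Notes on version B (the rewrite author's own statement) =====
-- stated objective: alternative
-- what changed: Dedups with dict.fromkeys instead of set()+sort-by-index, and replaces the itertools.permutations enumeration by factorial-number-system unranking: each rank k in range(n!) is decoded digit by digit (k//f picks from the remaining words, k%=f) into its permutation directly.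
import Mathlib
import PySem

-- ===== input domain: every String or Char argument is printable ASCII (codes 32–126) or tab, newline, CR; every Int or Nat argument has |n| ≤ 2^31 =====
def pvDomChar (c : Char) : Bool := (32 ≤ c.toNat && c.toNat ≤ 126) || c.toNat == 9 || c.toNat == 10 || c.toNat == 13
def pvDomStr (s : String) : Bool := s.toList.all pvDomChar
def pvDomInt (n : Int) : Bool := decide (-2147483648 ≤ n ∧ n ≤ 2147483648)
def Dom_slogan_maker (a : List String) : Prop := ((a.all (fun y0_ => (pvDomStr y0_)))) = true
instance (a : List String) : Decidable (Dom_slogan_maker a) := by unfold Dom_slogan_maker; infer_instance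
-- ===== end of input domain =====

-- B dedups with dict.fromkeys and replaces the itertools.permutations enumeration by
-- factorial-number-system unranking of each rank k in range(n!) (objective: alternative;
-- same return value, proved below).

-- ===== PORT A =====
-- join1(x): x1 = list(x) is the identity on a List, then ' '.join(x1)
def join1 (x : List String) : String := PySem.Str.join " " x

def slogan_maker (a : List String) : List String :=
  -- a2 = list(set(a)); a2.sort(key=a.index)  — key a.index always succeeds (elements come
  -- from a), so the .getD 0 default is never used
  let a2 := PySem.List.sorted (PySem.Set.ofList a)
      (fun s => (PySem.List.index? a s).getD 0) false
  -- result = list(itertools.permutations(a2, len(a2)))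
  let result := PySem.List.permutations a2 a2.length
  -- for i in range(0, len(result)): x.append(join1(result[i]))  (the 'i += 1' in the body
  -- has no effect in Python's for loop); result[i] is always in range
  (PySem.List.pyRange 0 (result.length : Int) 1).foldl
    (fun x i => x ++ [join1 (PySem.List.pyGetD result i [])]) []

-- ===== PORT B =====
-- the 'while rest:' loop of Source B, recursion on rest (state: rest, k, f; parts is the
-- emitted list); rest.pop(k // f) is always in range on reachable states, so the
-- unreachable none-branch returns []
def pvUnrank (rest : List String) (k f : Int) : List String :=
  if hne : rest = [] then []
  else
    let f' := PySem.Int.floordiv f (rest.length : Int)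
    match hp : PySem.List.pop? rest (PySem.Int.floordiv k f') with
    | none => []
    | some xr => xr.1 :: pvUnrank xr.2 (PySem.Int.mod k f') f'
termination_by rest.length
decreasing_by
  have := PySem.List.length_of_pop?_eq_some rest hp
  omega

def slogan_maker_alt (a : List String) : List String :=
  -- words = list(dict.fromkeys(a)); n = len(words)
  let words := PySem.List.dedup a
  -- fact = 1; for i in range(2, n + 1): fact *= i
  let fact := (PySem.List.pyRange 2 ((words.length : Int) + 1) 1).foldl (fun f i => f * i) 1
  -- for k in range(fact): decode rank k (rest = list(words) is a copy of words)
  (PySem.List.pyRange 0 fact 1).foldl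
    (fun out k => out ++ [PySem.Str.join " " (pvUnrank words k fact)]) []

-- ===== PRECONDITION & SPEC =====
def Spec_slogan_maker (a : List String) (out : List String) : Prop := out = slogan_maker_alt a
instance (a : List String) (out : List String) : Decidable (Spec_slogan_maker a out) := by unfold Spec_slogan_maker; infer_instance

-- ===== CLAIM (what is proved, stated in full; the proofs are below) =====
def Claim_equal_slogan_maker : Prop := ∀ (a : List String), Dom_slogan_maker a → Spec_slogan_maker a (slogan_maker a)

-- ===== LEMMAS AND PROOFS =====

-- ---- A side ----

-- first-occurrence indices are strictly increasing along set(a)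
lemma ofList_pairwise_idx (a : List String) :
    (PySem.Set.ofList a).Pairwise
      (fun x y => (PySem.List.index? a x).getD 0 < (PySem.List.index? a y).getD 0) := by
  induction a with
  | nil => simp [PySem.Set.ofList]
  | cons x t ih =>
    rw [PySem.Set.ofList_cons]
    refine List.Pairwise.cons ?_ ?_
    · intro y hy
      obtain ⟨hyt, hyx⟩ := (PySem.Set.mem_discard _ _ _).mp hy
      have hmem : y ∈ t := (PySem.Set.mem_ofList _ _).mp hyt
      have hs : (PySem.List.index? t y).isSome :=
        (PySem.List.index?_isSome_iff t y).mpr hmem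
      obtain ⟨k, hk⟩ := Option.isSome_iff_exists.mp hs
      rw [PySem.List.index?_cons_self, PySem.List.index?_cons_of_ne t (Ne.symm hyx), hk]
      simp
    · have hsub : ((PySem.Set.ofList t).discard x).Sublist (PySem.Set.ofList t) :=
        List.filter_sublist
      refine (List.Pairwise.sublist hsub ih).imp_of_mem ?_
      intro y z hy hz hlt
      obtain ⟨hyt, hyx⟩ := (PySem.Set.mem_discard _ _ _).mp hy
      obtain ⟨hzt, hzx⟩ := (PySem.Set.mem_discard _ _ _).mp hz
      have hys : (PySem.List.index? t y).isSome :=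
        (PySem.List.index?_isSome_iff t y).mpr ((PySem.Set.mem_ofList _ _).mp hyt)
      have hzs : (PySem.List.index? t z).isSome :=
        (PySem.List.index?_isSome_iff t z).mpr ((PySem.Set.mem_ofList _ _).mp hzt)
      obtain ⟨ky, hky⟩ := Option.isSome_iff_exists.mp hys
      obtain ⟨kz, hkz⟩ := Option.isSome_iff_exists.mp hzs
      rw [PySem.List.index?_cons_of_ne t (Ne.symm hyx),
          PySem.List.index?_cons_of_ne t (Ne.symm hzx), hky, hkz]
      rw [hky, hkz] at hlt
      simpa using hlt

-- A's sort by a.index leaves set(a) unchanged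
lemma sorted_ofList_idx (a : List String) :
    PySem.List.sorted (PySem.Set.ofList a) (fun s => (PySem.List.index? a s).getD 0) false
      = PySem.Set.ofList a :=
  PySem.List.sorted_eq_of_perm_of_pairwise_lt _ _ _ (List.Perm.refl _) (ofList_pairwise_idx a)

-- the A-side output loop is a map over result
lemma out_loop_eq_map (result : List (List String)) :
    (PySem.List.pyRange 0 (result.length : Int) 1).foldl
        (fun x i => x ++ [join1 (PySem.List.pyGetD result i [])]) []
      = result.map join1 := by
  rw [PySem.List.foldl_append_singleton_eq_map]
  have hcomp : (fun i => join1 (PySem.List.pyGetD result i []))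
      = join1 ∘ (fun i => PySem.List.pyGetD result i []) := rfl
  have h := PySem.List.map_pyGetD_pyRange_zero result []
  simp only [PySem.List.len] at h
  rw [hcomp, ← List.map_map, h]
  simp

-- ---- B side ----

-- range(a*b) split into b-blocks
lemma range_mul_flatMap (a b : Nat) :
    List.range (a * b) = (List.range a).flatMap (fun i => (List.range b).map (fun j => i * b + j)) := by
  induction a with
  | zero => simp
  | succ a ih =>
    rw [Nat.succ_mul, List.range_add, ih, List.range_succ]
    simp

-- the B-side factorial loop
lemma fact_loop : ∀ (n : Nat),
    (PySem.List.pyRange 2 ((n : Int) + 1) 1).foldl (fun f i => f * i) 1 = (n.factorial : Int)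
  | 0 => by decide
  | 1 => by decide
  | (n + 2) => by
    have hb : ((n + 2 : Nat) : Int) + 1 = (((n + 1 : Nat) : Int) + 1) + 1 := by push_cast; ring
    rw [hb, PySem.List.pyRange_one_succ_right (by push_cast; omega), List.foldl_append,
        fact_loop (n + 1)]
    simp only [List.foldl_cons, List.foldl_nil]
    push_cast [Nat.factorial_succ]
    ring

-- one decoding step of pvUnrank at rank i*m! + j
lemma pvUnrank_step (m i j : Nat) (rest : List String) (h : rest.length = m + 1)
    (hi : i < m + 1) (hj : j < m.factorial) :
    pvUnrank rest ((i * m.factorial + j : Nat) : Int) (((m + 1).factorial : Nat) : Int)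
      = rest.getD i "" :: pvUnrank (rest.eraseIdx i) ((j : Nat) : Int) ((m.factorial : Nat) : Int) := by
  have hne : rest ≠ [] := by intro h0; simp [h0] at h
  have hpos : 0 < m.factorial := Nat.factorial_pos m
  have hf' : PySem.Int.floordiv (((m + 1).factorial : Nat) : Int) ((rest.length : Nat) : Int)
      = ((m.factorial : Nat) : Int) := by
    rw [h, PySem.Int.floordiv_natCast]
    norm_num [Nat.factorial_succ, Nat.mul_div_cancel_left]
  have hdivn : (i * m.factorial + j) / m.factorial = i := by
    rw [Nat.add_comm, Nat.mul_comm, Nat.add_mul_div_left _ _ hpos, Nat.div_eq_of_lt hj]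
    omega
  have hmodn : (i * m.factorial + j) % m.factorial = j := by
    rw [Nat.add_comm, Nat.mul_comm, Nat.add_mul_mod_self_left, Nat.mod_eq_of_lt hj]
  have hdiv : PySem.Int.floordiv (((i * m.factorial + j : Nat)) : Int) ((m.factorial : Nat) : Int)
      = ((i : Nat) : Int) := by rw [PySem.Int.floordiv_natCast, hdivn]
  have hmod : PySem.Int.mod (((i * m.factorial + j : Nat)) : Int) ((m.factorial : Nat) : Int)
      = ((j : Nat) : Int) := by rw [PySem.Int.mod_natCast, hmodn]
  have hilt : i < rest.length := by omega
  have hpop : PySem.List.pop? rest ((i : Nat) : Int) = some (rest[i], rest.eraseIdx i) :=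
    PySem.List.pop?_natCast rest i hilt
  rw [List.getD_eq_getElem rest "" hilt, pvUnrank, dif_neg hne]
  simp only [hf', hmod]
  split
  next heq =>
    simp only [hf', hdiv, hpop] at heq
    cases heq
  next xr heq =>
    simp only [hf', hdiv, hpop, Option.some.injEq] at heq
    rw [← heq]

-- decoding all ranks 0 … n!-1 yields itertools' permutations, in order
lemma pvUnrank_map : ∀ (n : Nat) (rest : List String), rest.length = n →
    (List.range n.factorial).map
        (fun k => pvUnrank rest ((k : Nat) : Int) ((n.factorial : Nat) : Int))
      = PySem.List.permutations rest n
  | 0, rest, h => by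
    have hr : rest = [] := List.eq_nil_of_length_eq_zero h
    subst hr
    unfold pvUnrank
    simp [Nat.factorial, PySem.List.permutations_zero]
  | (m + 1), rest, h => by
    rw [Nat.factorial_succ, range_mul_flatMap, PySem.List.permutations_succ, h,
        List.map_flatMap]
    apply List.flatMap_congr
    intro i hi
    have hilt : i < rest.length := by rw [h]; exact List.mem_range.mp hi
    rw [List.getElem?_eq_getElem hilt]
    simp only [List.map_map]
    have hlen : (rest.eraseIdx i).length = m := by
      rw [List.length_eraseIdx]
      simp [hilt]
      omega
    rw [← pvUnrank_map m (rest.eraseIdx i) hlen, List.map_map]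
    apply List.map_congr_left
    intro j hj
    have hj' : j < m.factorial := List.mem_range.mp hj
    have := pvUnrank_step m i j rest h (by rw [h] at hilt; exact hilt) hj'
    rw [List.getD_eq_getElem rest "" hilt] at this
    have hcast : ((i * m.factorial + j : Nat) : Int)
        = (((i * Nat.factorial m + j : Nat)) : Int) := rfl
    simpa [Nat.factorial_succ] using this

-- ===== VERDICT (by name: the statement is the Claim_ definition above) =====
theorem slogan_maker_spec : Claim_equal_slogan_maker := by
  intro a _
  show slogan_maker a = slogan_maker_alt a
  simp only [slogan_maker, slogan_maker_alt]
  rw [sorted_ofList_idx, out_loop_eq_map, PySem.List.dedup_eq_ofList,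
      fact_loop (PySem.Set.ofList a).length, PySem.List.pyRange_zero_natCast,
      List.foldl_map, PySem.List.foldl_append_singleton_eq_map]
  rw [← pvUnrank_map (PySem.Set.ofList a).length (PySem.Set.ofList a) rfl]
  simp [join1]
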